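-- pv_equiv track=rewrite | github.com/shinyo-xinyi/FAB_Rate | Server/sentimentAnalyzer.py | allcap_differential
-- ===== SOURCE A (Python) =====
-- def allcap_differential(words):
--     """
--     Check whether just some words in the input are ALL CAPS
--     :param list words: The words to inspect
--     :returns: `True` if some but not all items in `words` are ALL CAPS
--     """
--     is_different = False
--     allcap_words = 0
--     for word in words:
--         if word.isupper():
--             allcap_words += 1
--     if len(words) <= 2 and allcap_words == len(words):
--         # if the sentence only contains less than or equal to two words that are ALL CAPS
--         return True
--     cap_differential = len(words) - allcap_words
--     if 0 < cap_differential < len(words):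
--         is_different = True
--     return is_different
-- ===== SOURCE B (Python) =====
-- def allcap_differential(words):
--     # Single early-exiting scan over the classes of words: collect the set of
--     # "is all-caps" labels seen so far and stop as soon as both classes appear.
--     kinds = set()
--     for word in words:
--         kinds.add(word.isupper())
--         if len(kinds) == 2:
--             # both an ALL-CAPS and a non-ALL-CAPS word seen: some but not all
--             return True
--     return len(words) <= 2 and kinds != {False}
-- ===== Notes on version B (the rewrite author's own statement) =====
-- stated objective: alternative
-- what changed: B scans once with an early exit, accumulating the set of isupper() class labels and returning True as soon as both classes are seen, instead of counting all-caps words and comparing arithmetic differentials after a full pass.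
import Mathlib
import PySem

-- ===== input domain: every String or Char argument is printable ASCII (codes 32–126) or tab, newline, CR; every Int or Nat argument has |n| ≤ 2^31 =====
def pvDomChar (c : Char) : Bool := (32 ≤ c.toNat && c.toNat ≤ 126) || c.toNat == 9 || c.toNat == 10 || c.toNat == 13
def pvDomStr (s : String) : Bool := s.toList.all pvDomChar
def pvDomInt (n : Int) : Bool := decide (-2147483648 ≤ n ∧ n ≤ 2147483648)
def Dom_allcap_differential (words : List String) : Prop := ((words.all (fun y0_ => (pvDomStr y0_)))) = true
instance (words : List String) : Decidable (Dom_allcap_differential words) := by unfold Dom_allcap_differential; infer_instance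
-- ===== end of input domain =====

-- B replaces A's count-then-compare pass by a single early-exiting scan over the set of
-- isupper() class labels (objective: alternative; same asymptotic cost).

-- ===== PORT A =====
-- Python str.isupper() on the ASCII domain: at least one cased (alphabetic) char and no lowercase char.
def pyIsupper (s : String) : Bool :=
  s.toList.any PySem.Chars.isalpha && s.toList.all (fun c => !PySem.Chars.islower c)

def allcap_differential (words : List String) : Bool :=
  let allcap_words : Int := words.foldl (fun acc w => if pyIsupper w then acc + 1 else acc) 0
  if (words.length : Int) ≤ 2 && allcap_words == (words.length : Int) then
    true
  else
    let cap_differential : Int := (words.length : Int) - allcap_words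
    decide (0 < cap_differential ∧ cap_differential < (words.length : Int))

-- ===== PORT B =====
-- the loop of Source B: kinds accumulates the set of class labels; early return on both classes
def allcapGo (n : Nat) : List String → PySem.Set Bool → Bool
  | [], kinds => decide (n ≤ 2) && !(PySem.Set.equal kinds (PySem.Set.ofList [false]))
  | w :: ws, kinds =>
    let kinds' := PySem.Set.add kinds (pyIsupper w)
    if PySem.Set.len kinds' == 2 then true else allcapGo n ws kinds'

def allcap_differential_alt (words : List String) : Bool :=
  allcapGo words.length words PySem.Set.empty

-- ===== PRECONDITION & SPEC =====
def Spec_allcap_differential (words : List String) (out : Bool) : Prop := out = allcap_differential_alt words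
instance (words : List String) (out : Bool) : Decidable (Spec_allcap_differential words out) := by unfold Spec_allcap_differential; infer_instance

-- ===== CLAIM (what is proved, stated in full; the proofs are below) =====
def Claim_equal_allcap_differential : Prop := ∀ (words : List String), Dom_allcap_differential words → Spec_allcap_differential words (allcap_differential words)

-- ===== LEMMAS AND PROOFS =====
theorem count_shift (words : List String) (a : Int) :
    words.foldl (fun acc w => if pyIsupper w then acc + 1 else acc) a
      = a + (words.countP pyIsupper : Int) := by
  induction words generalizing a with
  | nil => simp
  | cons w ws ih =>
    simp only [List.foldl_cons, List.countP_cons, ih]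
    by_cases h : pyIsupper w = true
    · simp [h]; ring
    · simp [h]

-- the loop invariant of B: with kinds one of ∅, {true}, {false}, the loop computes
-- "both classes occur" short-circuited, else the final len ≤ 2 ∧ no false label test
theorem go_spec (ws : List String) (n : Nat) (s : PySem.Set Bool)
    (hs : s = [] ∨ s = [true] ∨ s = [false]) :
    allcapGo n ws s =
      (((s.contains true || ws.any pyIsupper) &&
        (s.contains false || ws.any (fun w => !pyIsupper w)))
       || (decide (n ≤ 2) &&
           !(s.contains false || ws.any (fun w => !pyIsupper w)))) := by
  induction ws generalizing s with
  | nil =>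
    rcases hs with h | h | h <;> subst h <;>
      simp [allcapGo, PySem.Set.equal, PySem.Set.ofList, PySem.Set.add, PySem.Set.issubset]
  | cons w ws ih =>
    by_cases hc : pyIsupper w = true
    · rcases hs with h | h | h <;> subst h
      · have hstep : allcapGo n (w :: ws) ([] : PySem.Set Bool) = allcapGo n ws [true] := by
          simp [allcapGo, PySem.Set.add, PySem.Set.len, hc]
        rw [hstep, ih [true] (by simp)]
        simp [hc]
      · have hstep : allcapGo n (w :: ws) ([true] : PySem.Set Bool) = allcapGo n ws [true] := by
          simp [allcapGo, PySem.Set.add, PySem.Set.len, hc]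
        rw [hstep, ih [true] (by simp)]
        simp [hc]
      · have hstep : allcapGo n (w :: ws) ([false] : PySem.Set Bool) = true := by
          simp [allcapGo, PySem.Set.add, PySem.Set.len, hc]
        rw [hstep]
        simp [hc]
    · rw [Bool.not_eq_true] at hc
      rcases hs with h | h | h <;> subst h
      · have hstep : allcapGo n (w :: ws) ([] : PySem.Set Bool) = allcapGo n ws [false] := by
          simp [allcapGo, PySem.Set.add, PySem.Set.len, hc]
        rw [hstep, ih [false] (by simp)]
        simp [hc]
      · have hstep : allcapGo n (w :: ws) ([true] : PySem.Set Bool) = true := by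
          simp [allcapGo, PySem.Set.add, PySem.Set.len, hc]
        rw [hstep]
        simp [hc]
      · have hstep : allcapGo n (w :: ws) ([false] : PySem.Set Bool) = allcapGo n ws [false] := by
          simp [allcapGo, PySem.Set.add, PySem.Set.len, hc]
        rw [hstep, ih [false] (by simp)]
        simp [hc]

-- ===== VERDICT (by name: the statement is the Claim_ definition above) =====
theorem allcap_differential_spec : Claim_equal_allcap_differential := by
  intro words _
  unfold Spec_allcap_differential allcap_differential allcap_differential_alt
  rw [go_spec words words.length PySem.Set.empty (Or.inl rfl)]
  simp only [count_shift, zero_add, PySem.Set.empty]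
  have hle : words.countP pyIsupper ≤ words.length := List.countP_le_length
  have hany : (words.any (fun w => pyIsupper w))
      = decide (0 < words.countP pyIsupper) := by
    rcases Bool.eq_false_or_eq_true (words.any (fun w => pyIsupper w)) with h | h <;> rw [h]
    · rw [eq_comm, decide_eq_true_iff]
      rcases List.any_eq_true.mp h with ⟨w, hw, hp⟩
      exact List.countP_pos_iff.mpr ⟨w, hw, hp⟩
    · rw [eq_comm, decide_eq_false_iff_not]
      intro hc
      rcases List.countP_pos_iff.mp hc with ⟨w, hw, hp⟩
      rw [List.any_eq_false] at h
      simp_all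
  have hanyn : (words.any (fun w => !pyIsupper w))
      = decide (words.countP pyIsupper < words.length) := by
    rcases Bool.eq_false_or_eq_true (words.any (fun w => !pyIsupper w)) with h | h <;> rw [h]
    · rw [eq_comm, decide_eq_true_iff]
      rcases List.any_eq_true.mp h with ⟨w, hw, hp⟩
      refine lt_of_le_of_ne hle ?_
      intro hc
      have := List.countP_eq_length.mp hc w hw
      simp_all
    · rw [eq_comm, decide_eq_false_iff_not]
      intro hc
      rw [List.any_eq_false] at h
      have : words.countP pyIsupper = words.length :=
        List.countP_eq_length.mpr (fun w hw => by simpa using h w hw)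
      omega
  rw [hany, hanyn]
  simp only [PySem.Set.contains, List.contains_nil, Bool.false_or]
  by_cases h1 : words.length ≤ 2 <;>
  by_cases h2 : words.countP pyIsupper < words.length <;>
  by_cases h3 : 0 < words.countP pyIsupper <;>
    simp [h1, h2, h3]
  all_goals first
    | omega
    | (exact List.countP_eq_length.mp (by omega))
    | (by_contra hq
       push Not at hq
       have hall : words.countP pyIsupper = words.length :=
         List.countP_eq_length.mpr (fun w hw => by simpa using hq w hw)
       omega)
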